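-- pv_equiv track=rewrite | github.com/mellis-netizen/OCL_Twitter_Scraper | src/validators.py | validate_keyword_list
-- ===== SOURCE A (Python) =====
-- from typing import List, Optional
--
-- def validate_keyword_list(keywords: List[str]) -> List[str]:
--     """Validate list of keywords"""
--     if not keywords:
--         return keywords
--
--     if len(keywords) > 100:
--         raise ValueError("Too many keywords (max 100)")
--
--     validated = []
--     for keyword in keywords:
--         if not keyword or len(keyword) < 2:
--             continue  # Skip empty or too short keywords
--
--         if len(keyword) > 100:
--             raise ValueError(f"Keyword too long: {keyword[:50]}... (max 100 characters)")
--
--         # Remove SQL wildcards and special characters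
--         cleaned = keyword.replace('%', '').replace('_', '').replace('\\', '')
--         validated.append(cleaned)
--
--     return validated
-- ===== SOURCE B (Python) =====
-- from typing import List
--
-- _BAD = frozenset('%_\\')
--
-- def _clean(kw: str) -> str:
--     # per-character filter instead of chained str.replace
--     return ''.join(c for c in kw if c not in _BAD)
--
-- def _go(keywords: List[str], i: int) -> List[str]:
--     # structural recursion over the list, building the result back-to-front
--     if i == len(keywords):
--         return []
--     kw = keywords[i]
--     if len(kw) > 100:
--         raise ValueError(f"Keyword too long: {kw[:50]}... (max 100 characters)")
--     tail = _go(keywords, i + 1)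
--     if not kw or len(kw) < 2:
--         return tail
--     return [_clean(kw)] + tail
--
-- def validate_keyword_list(keywords: List[str]) -> List[str]:
--     """Validate list of keywords (recursive, result built by prepending)."""
--     if not keywords:
--         return keywords
--     if len(keywords) > 100:
--         raise ValueError("Too many keywords (max 100)")
--     return _go(keywords, 0)
-- ===== Notes on version B (the rewrite author's own statement) =====
-- stated objective: alternative
-- what changed: A's iterative loop with an append accumulator is replaced by a structural recursion that builds the result back-to-front by prepending to the recursive call, and cleaning is a per-character set-membership filter instead of three chained replace calls.
import Mathlib
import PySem

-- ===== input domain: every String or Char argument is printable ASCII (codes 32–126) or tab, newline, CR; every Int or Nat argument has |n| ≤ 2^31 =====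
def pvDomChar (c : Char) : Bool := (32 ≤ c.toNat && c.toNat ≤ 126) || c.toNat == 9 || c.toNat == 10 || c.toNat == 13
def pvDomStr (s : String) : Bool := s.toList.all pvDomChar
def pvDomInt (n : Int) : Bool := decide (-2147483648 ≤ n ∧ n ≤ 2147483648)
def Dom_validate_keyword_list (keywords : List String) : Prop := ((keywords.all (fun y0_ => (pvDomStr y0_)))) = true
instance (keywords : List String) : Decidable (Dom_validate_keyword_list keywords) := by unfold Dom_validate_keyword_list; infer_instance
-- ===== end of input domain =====

-- B replaces A's iterative append-accumulator loop with chained replace by a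
-- structural recursion that prepends to the recursive call and cleans each
-- keyword by a per-character filter; objective: alternative decomposition.

-- ===== PORT A =====
-- cleaned = keyword.replace('%','').replace('_','').replace('\\','')
def pvCleanA (kw : String) : String :=
  PySem.Str.replace (PySem.Str.replace (PySem.Str.replace kw "%" "") "_" "") "\\" ""

-- the for-loop with accumulator `validated`; the len>100 raise is excluded by Pre_
def pvLoopA : List String → List String → List String
  | [], validated => validated
  | kw :: rest, validated =>
    if kw = "" ∨ PySem.Str.len kw < 2 then pvLoopA rest validated
    else if PySem.Str.len kw > 100 then validated  -- ValueError, excluded by Pre_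
    else pvLoopA rest (validated ++ [pvCleanA kw])

def validate_keyword_list (keywords : List String) : List String :=
  if keywords = [] then keywords
  else if keywords.length > 100 then []  -- ValueError, excluded by Pre_
  else pvLoopA keywords []

-- ===== PORT B =====
-- ''.join(c for c in kw if c not in '%_\\')
def pvCleanB (kw : String) : String :=
  String.ofList (kw.toList.filter (fun c => !(c == '%' || c == '_' || c == '\\')))

-- _go: recursion over the list, result built by prepending to the recursive call
def pvGoB : List String → List String
  | [] => []
  | kw :: rest =>
    if PySem.Str.len kw > 100 then []  -- ValueError, excluded by Pre_
    else if kw = "" ∨ PySem.Str.len kw < 2 then pvGoB rest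
    else pvCleanB kw :: pvGoB rest

def validate_keyword_list_alt (keywords : List String) : List String :=
  if keywords = [] then keywords
  else if keywords.length > 100 then []  -- ValueError, excluded by Pre_
  else pvGoB keywords

-- ===== PRECONDITION & SPEC =====
-- Pre_ excludes exactly the inputs where Python A raises ValueError:
-- more than 100 keywords, or any keyword longer than 100 characters.
def Pre_validate_keyword_list (keywords : List String) : Prop :=
  keywords.length ≤ 100 ∧ ∀ kw ∈ keywords, kw.toList.length ≤ 100

instance (keywords : List String) : Decidable (Pre_validate_keyword_list keywords) := by
  unfold Pre_validate_keyword_list; infer_instance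

def pvWitness_validate_keyword_list : List String := ["bit%coin", "a", "", "eth_usd\\x"]

def Spec_validate_keyword_list (keywords : List String) (out : List String) : Prop := out = validate_keyword_list_alt keywords
instance (keywords : List String) (out : List String) : Decidable (Spec_validate_keyword_list keywords out) := by unfold Spec_validate_keyword_list; infer_instance

-- ===== CLAIM (what is proved, stated in full; the proofs are below) =====
def Claim_equal_validate_keyword_list : Prop := ∀ (keywords : List String), Dom_validate_keyword_list keywords → Pre_validate_keyword_list keywords → Spec_validate_keyword_list keywords (validate_keyword_list keywords)

-- ===== LEMMAS AND PROOFS =====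

-- Chars.replace with a single-character pattern and empty replacement is a filter.
theorem pvReplaceGo_single (c0 : Char) :
    ∀ (fuel : Nat) (l acc : List Char), l.length ≤ fuel →
      PySem.Chars.replace.go [c0] [] fuel l acc
        = acc.reverse ++ l.filter (fun c => !(c == c0)) := by
  intro fuel
  induction fuel with
  | zero =>
      intro l acc h
      have : l = [] := List.length_eq_zero_iff.mp (Nat.le_zero.mp h)
      subst this
      simp [PySem.Chars.replace.go]
  | succ n ih =>
      intro l acc h
      cases l with
      | nil => simp [PySem.Chars.replace.go]
      | cons c t =>
          simp only [PySem.Chars.replace.go]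
          by_cases hc : c = c0
          · subst hc
            have hp : List.isPrefixOf [c] (c :: t) = true := by
              simp [List.isPrefixOf]
            simp only [hp, if_pos]
            rw [ih _ _ (by simpa using Nat.le_of_succ_le_succ h)]
            simp
          · have hp : List.isPrefixOf [c0] (c :: t) = false := by
              simp [List.isPrefixOf]
              intro h'; exact hc h'.symm
            simp only [hp, Bool.false_eq_true, if_false]
            rw [ih _ _ (by simpa using Nat.le_of_succ_le_succ h)]
            simp [hc]

theorem pvReplace_single (c0 : Char) (cs : List Char) :
    PySem.Chars.replace cs [c0] [] = cs.filter (fun c => !(c == c0)) := by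
  simp only [PySem.Chars.replace]
  rw [pvReplaceGo_single c0 cs.length cs [] (le_refl _)]
  simp

theorem pvClean_eq (kw : String) : pvCleanA kw = pvCleanB kw := by
  unfold pvCleanA pvCleanB
  apply String.toList_inj.mp
  simp only [PySem.Str.toList_replace]
  rw [show ("%" : String).toList = ['%'] from rfl,
     show ("_" : String).toList = ['_'] from rfl,
     show ("\\" : String).toList = ['\\'] from rfl,
     show ("" : String).toList = [] from rfl]
  simp only [pvReplace_single, List.filter_filter, String.toList_ofList]
  apply List.filter_congr
  intro c _
  cases hc1 : (c == '%') <;> cases hc2 : (c == '_') <;> cases hc3 : (c == '\\') <;> simp_all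

-- A's accumulator loop equals acc ++ B's recursion, when no keyword is over-long.
theorem pvLoopA_eq (l : List String) :
    (∀ kw ∈ l, kw.toList.length ≤ 100) → ∀ acc : List String,
      pvLoopA l acc = acc ++ pvGoB l := by
  induction l with
  | nil => intro _ acc; simp [pvLoopA, pvGoB]
  | cons kw rest ih =>
      intro h acc
      have hkw : kw.toList.length ≤ 100 := h kw (List.mem_cons_self ..)
      have hlen : PySem.Str.len kw = (kw.toList.length : Int) := rfl
      have hrest : ∀ k ∈ rest, k.toList.length ≤ 100 := fun k hk => h k (List.mem_cons_of_mem _ hk)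
      have hnl : ¬ (PySem.Str.len kw > 100) := by rw [gt_iff_lt, hlen]; omega
      unfold pvLoopA pvGoB
      by_cases hshort : kw = "" ∨ PySem.Str.len kw < 2
      · rw [if_pos hshort, if_neg hnl, if_pos hshort, ih hrest acc]
      · rw [if_neg hshort, if_neg hnl, if_neg hnl, if_neg hshort, ih hrest]
        simp [pvClean_eq]

-- ===== VERDICT (by name: the statement is the Claim_ definition above) =====
theorem validate_keyword_list_spec : Claim_equal_validate_keyword_list := by
  intro keywords _ hpre
  unfold Spec_validate_keyword_list validate_keyword_list validate_keyword_list_alt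
  obtain ⟨hcount, hlens⟩ := hpre
  by_cases hnil : keywords = []
  · simp [hnil]
  · rw [if_neg hnil, if_neg hnil, if_neg (by omega), if_neg (by omega)]
    exact pvLoopA_eq keywords hlens []
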